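-- pv_equiv track=rewrite | github.com/NormPlum/freeCodeCamp_DailyCodingChallenges | 172.py | separate_letters_and_numbers
-- ===== SOURCE A (Python) =====
-- def separate_letters_and_numbers(s):
--     result = ""
--
--     for i, char in enumerate(s):
--         if i > 0:
--             if char.isalpha() and not previous_was_letter:
--                 result += "-"
--             elif not char.isalpha() and previous_was_letter:
--                 result += "-"
--
--         previous_was_letter = char.isalpha()
--         result += char
--
--     return result
-- ===== SOURCE B (Python) =====
-- def separate_letters_and_numbers(s):
--     # Split s into maximal runs of letters / non-letters, then join the runs with "-".
--     runs = []
--     i, n = 0, len(s)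
--     while i < n:
--         k = s[i].isalpha()
--         j = i + 1
--         while j < n and s[j].isalpha() == k:
--             j += 1
--         runs.append(s[i:j])
--         i = j
--     return "-".join(runs)
-- ===== Notes on version B (the rewrite author's own statement) =====
-- stated objective: alternative
-- what changed: Replaces the character-by-character loop that tracks the previous character's letter-ness and conditionally appends a dash with a run-splitting pass: the string is cut into maximal letter/non-letter runs which are then dash-joined.
import Mathlib
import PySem

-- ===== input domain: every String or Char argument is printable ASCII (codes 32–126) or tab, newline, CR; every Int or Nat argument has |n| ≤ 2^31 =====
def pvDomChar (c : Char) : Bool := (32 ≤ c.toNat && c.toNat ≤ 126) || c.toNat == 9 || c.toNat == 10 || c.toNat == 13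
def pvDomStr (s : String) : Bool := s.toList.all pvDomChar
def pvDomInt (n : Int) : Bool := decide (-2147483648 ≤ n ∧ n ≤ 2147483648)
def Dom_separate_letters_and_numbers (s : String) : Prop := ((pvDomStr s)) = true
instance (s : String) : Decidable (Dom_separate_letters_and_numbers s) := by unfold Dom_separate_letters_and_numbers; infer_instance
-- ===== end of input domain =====

-- B replaces A's previous-was-letter boundary tracking by splitting into maximal letter/non-letter runs and dash-joining them (alternative decomposition, same cost).

-- ===== PORT A =====
-- the loop body of A: on (result, previous_was_letter) and (i, char)
def pvStepA (st : List Char × Bool) (p : Int × Char) : List Char × Bool :=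
  let res :=
    if p.1 > 0 then
      (if PySem.Chars.isalpha p.2 && !st.2 then st.1 ++ ['-']
       else if !(PySem.Chars.isalpha p.2) && st.2 then st.1 ++ ['-']
       else st.1)
    else st.1
  (res ++ [p.2], PySem.Chars.isalpha p.2)

def separate_letters_and_numbers (s : String) : String :=
  String.mk (((PySem.List.enumerate s.toList 0).foldl pvStepA ([], false)).1)

-- ===== PORT B =====
-- maximal runs of equal letter-ness (B's outer while loop; the inner while is takeWhile/dropWhile)
def pvRuns : List Char → List (List Char)
  | [] => []
  | c :: rest =>
    let k := PySem.Chars.isalpha c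
    (c :: rest.takeWhile (fun d => PySem.Chars.isalpha d == k))
      :: pvRuns (rest.dropWhile (fun d => PySem.Chars.isalpha d == k))
  termination_by cs => cs.length
  decreasing_by
    simp only [List.length_cons]
    exact Nat.lt_succ_of_le (List.length_dropWhile_le _ _)

def separate_letters_and_numbers_alt (s : String) : String :=
  String.mk (PySem.Chars.join ['-'] (pvRuns s.toList))

-- ===== PRECONDITION & SPEC =====
def Spec_separate_letters_and_numbers (s : String) (out : String) : Prop := out = separate_letters_and_numbers_alt s
instance (s : String) (out : String) : Decidable (Spec_separate_letters_and_numbers s out) := by unfold Spec_separate_letters_and_numbers; infer_instance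

-- ===== CLAIM (what is proved, stated in full; the proofs are below) =====
def Claim_equal_separate_letters_and_numbers : Prop := ∀ (s : String), Dom_separate_letters_and_numbers s → Spec_separate_letters_and_numbers s (separate_letters_and_numbers s)

-- ===== LEMMAS AND PROOFS =====

-- the text A produces for the characters after the first, given previous_was_letter
def pvTail (prev : Bool) : List Char → List Char
  | [] => []
  | c :: cs =>
      (if PySem.Chars.isalpha c != prev then ['-'] else [])
        ++ c :: pvTail (PySem.Chars.isalpha c) cs

lemma pvTail_eq_of_all (prev : Bool) (l ds : List Char)
    (h : ∀ x ∈ l, PySem.Chars.isalpha x = prev) :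
    pvTail prev (l ++ ds) = l ++ pvTail prev ds := by
  induction l with
  | nil => simp
  | cons a l ih =>
      have ha : PySem.Chars.isalpha a = prev := h a (by simp)
      simp [pvTail, ha, ih (fun x hx => h x (by simp [hx]))]

lemma pvFoldA (cs : List Char) : ∀ (n : Int) (res : List Char) (prev : Bool), 1 ≤ n →
    ((PySem.List.enumerate cs n).foldl pvStepA (res, prev)).1 = res ++ pvTail prev cs := by
  induction cs with
  | nil => intro n res prev _; simp [PySem.List.enumerate_nil, pvTail]
  | cons c cs ih =>
      intro n res prev hn
      rw [PySem.List.enumerate_cons]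
      simp only [List.foldl_cons]
      have hstep : pvStepA (res, prev) (n, c)
          = (res ++ pvTail prev [c] , PySem.Chars.isalpha c) := by
        simp only [pvStepA, pvTail]
        cases h : PySem.Chars.isalpha c <;> cases prev <;>
          simp [show n > 0 by omega]
      rw [hstep, ih (n + 1) _ _ (by omega)]
      cases h : PySem.Chars.isalpha c <;> cases prev <;>
        simp [pvTail, h]

lemma pvRuns_join_aux (n : Nat) : ∀ (cs : List Char), cs.length ≤ n → ∀ c : Char,
    PySem.Chars.join ['-'] (pvRuns (c :: cs)) = c :: pvTail (PySem.Chars.isalpha c) cs := by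
  induction n with
  | zero =>
      intro cs hcs c
      have : cs = [] := by cases cs <;> simp_all
      subst this
      simp [pvRuns, PySem.Chars.join, pvTail, List.intercalate]
  | succ n ih =>
    intro cs hcs c
    rw [pvRuns]
    set k := PySem.Chars.isalpha c with hk
    have hsplit : cs = cs.takeWhile (fun d => PySem.Chars.isalpha d == k)
        ++ cs.dropWhile (fun d => PySem.Chars.isalpha d == k) := (List.takeWhile_append_dropWhile).symm
    have htk : ∀ x ∈ cs.takeWhile (fun d => PySem.Chars.isalpha d == k), PySem.Chars.isalpha x = k := by
      intro x hx
      have := List.mem_takeWhile_imp hx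
      simpa using this
    conv_rhs => rw [hsplit]
    rw [pvTail_eq_of_all k _ _ htk]
    cases hd : cs.dropWhile (fun d => PySem.Chars.isalpha d == k) with
    | nil => rw [pvRuns, PySem.Chars.join_singleton, pvTail]; simp
    | cons d ds =>
        have hdk : (PySem.Chars.isalpha d == k) = false := by
          have h2 := List.head_dropWhile_not (fun e => PySem.Chars.isalpha e == k) (l := cs) (by simp [hd])
          simpa [hd] using h2
        have hlen : ds.length < cs.length := by
          have := List.length_dropWhile_le (p := fun d => PySem.Chars.isalpha d == k) (l := cs)
          rw [hd] at this; simp at this; omega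
        have hih := ih ds (by omega) d
        have hcons : pvRuns (d :: ds)
            = (d :: ds.takeWhile (fun e => PySem.Chars.isalpha e == PySem.Chars.isalpha d))
              :: pvRuns (ds.dropWhile (fun e => PySem.Chars.isalpha e == PySem.Chars.isalpha d)) := by
          rw [pvRuns]
        rw [hcons, PySem.Chars.join_cons_cons, ← hcons, hih, pvTail]
        have hne : (PySem.Chars.isalpha d != k) = true := by
          simp only [bne_iff_ne]; simpa using hdk
        simp [hne]
-- ===== VERDICT (by name: the statement is the Claim_ definition above) =====
theorem separate_letters_and_numbers_spec : Claim_equal_separate_letters_and_numbers := by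
  intro s _
  unfold Spec_separate_letters_and_numbers separate_letters_and_numbers separate_letters_and_numbers_alt
  cases hcs : s.toList with
  | nil => simp [PySem.List.enumerate_nil, pvRuns, PySem.Chars.join, List.intercalate]
  | cons c cs =>
      rw [PySem.List.enumerate_cons]
      simp only [List.foldl_cons]
      have hstep : pvStepA ([], false) (0, c) = ([c], PySem.Chars.isalpha c) := by
        simp [pvStepA]
      rw [hstep, pvFoldA cs (0+1) [c] (PySem.Chars.isalpha c) (by omega), pvRuns_join_aux cs.length cs le_rfl c]
      simp
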